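-- pv_equiv track=rewrite | github.com/BBbibiburst/nlpLab1 | HMM/Name_dict_maker.py | get_status_list
-- ===== SOURCE A (Python) =====
-- def get_status_list(word_list):
--     status_list = ''
--     for word_pair in word_list:
--         word = word_pair[0]
--         word_class = word_pair[1]
--         word_len = len(word)
--         if word_class != 'nr':
--             status_list += 'O' * word_len
--             continue
--         if word_len == 1:
--             status_list += 'S'
--         else:
--             for i in range(word_len):
--                 if i == 0:
--                     status_list += 'B'
--                 elif i == word_len - 1:
--                     status_list += 'E'
--                 else:
--                     status_list += 'M'
--     return status_list
-- ===== SOURCE B (Python) =====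
-- def get_status_list(word_list):
--     pieces = []
--     for word, word_class in word_list:
--         n = len(word)
--         if word_class != 'nr':
--             pieces.append('O' * n)
--         elif n <= 1:
--             pieces.append('S' * n)
--         else:
--             pieces.append('B' + 'M' * (n - 2) + 'E')
--     return ''.join(pieces)
-- ===== Notes on version B (the rewrite author's own statement) =====
-- stated objective: simpler
-- what changed: Each word's tag block is built as one closed-form string ('O'*n, 'S'*n, or 'B'+'M'*(n-2)+'E') collected into a list and joined once, instead of a per-character indexed inner loop with i==0/i==len-1 checks and repeated string concatenation.
import Mathlib
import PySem

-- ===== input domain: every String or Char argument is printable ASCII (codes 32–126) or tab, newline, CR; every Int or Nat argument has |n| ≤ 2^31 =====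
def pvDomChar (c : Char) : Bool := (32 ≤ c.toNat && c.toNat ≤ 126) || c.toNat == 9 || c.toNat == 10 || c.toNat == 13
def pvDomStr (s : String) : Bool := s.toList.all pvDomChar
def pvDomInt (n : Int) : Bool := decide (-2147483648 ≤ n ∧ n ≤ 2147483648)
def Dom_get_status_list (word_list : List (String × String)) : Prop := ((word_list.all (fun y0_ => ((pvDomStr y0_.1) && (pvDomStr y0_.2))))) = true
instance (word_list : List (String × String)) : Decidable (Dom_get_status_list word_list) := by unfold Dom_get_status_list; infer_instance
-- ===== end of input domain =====

-- B builds each word's tag block by a closed form and joins once, instead of A's per-character indexed inner loop; same return value everywhere.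

-- ===== PORT A =====
def get_status_list (word_list : List (String × String)) : String :=
  String.ofList <|
    word_list.foldl (fun status_list word_pair =>
      let word := word_pair.1.toList
      let word_class := word_pair.2
      let word_len : Int := word.length
      if word_class ≠ "nr" then
        status_list ++ List.replicate word_len.toNat 'O'
      else if word_len = 1 then
        status_list ++ ['S']
      else
        (PySem.List.pyRange 0 word_len 1).foldl (fun sl i =>
          if i = 0 then sl ++ ['B']
          else if i = word_len - 1 then sl ++ ['E']
          else sl ++ ['M']) status_list) []

-- ===== PORT B =====
def get_status_list_alt (word_list : List (String × String)) : String :=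
  String.ofList
    ((word_list.map (fun wp =>
      let n := wp.1.toList.length
      if wp.2 ≠ "nr" then List.replicate n 'O'
      else if n ≤ 1 then List.replicate n 'S'
      else 'B' :: (List.replicate (n - 2) 'M' ++ ['E']))).flatten)

-- ===== PRECONDITION & SPEC =====
def Spec_get_status_list (word_list : List (String × String)) (out : String) : Prop := out = get_status_list_alt word_list
instance (word_list : List (String × String)) (out : String) : Decidable (Spec_get_status_list word_list out) := by unfold Spec_get_status_list; infer_instance

-- ===== CLAIM (what is proved, stated in full; the proofs are below) =====
def Claim_equal_get_status_list : Prop := ∀ (word_list : List (String × String)), Dom_get_status_list word_list → Spec_get_status_list word_list (get_status_list word_list)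

-- ===== LEMMAS AND PROOFS =====

-- B's per-word tag block, as used by the proofs
def pvPiece (wp : String × String) : List Char :=
  let n := wp.1.toList.length
  if wp.2 ≠ "nr" then List.replicate n 'O'
  else if n ≤ 1 then List.replicate n 'S'
  else 'B' :: (List.replicate (n - 2) 'M' ++ ['E'])

-- A's inner indexed loop over range(word_len) equals B's closed form, for word_len ≥ 2
lemma pvInner (n : Nat) (h : 2 ≤ n) (acc : List Char) :
    (PySem.List.pyRange 0 (n : Int) 1).foldl (fun sl i =>
      if i = 0 then sl ++ ['B']
      else if i = (n : Int) - 1 then sl ++ ['E']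
      else sl ++ ['M']) acc
    = acc ++ 'B' :: (List.replicate (n - 2) 'M' ++ ['E']) := by
  rw [PySem.List.pyRange_one_append 0 1 (n : Int) (by omega) (by omega),
      PySem.List.pyRange_one_append 1 ((n : Int) - 1) (n : Int) (by omega) (by omega)]
  have hsing : PySem.List.pyRange ((n : Int) - 1) (n : Int) 1 = [(n : Int) - 1] := by
    have := PySem.List.pyRange_one_singleton ((n : Int) - 1)
    simpa using this
  have h01 : PySem.List.pyRange 0 1 1 = [0] := by
    simpa using PySem.List.pyRange_one_singleton 0
  rw [hsing, h01]
  simp only [List.foldl_append, List.foldl_cons, List.foldl_nil]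
  have hmid : ∀ init : List Char,
      (PySem.List.pyRange 1 ((n : Int) - 1) 1).foldl (fun sl i =>
        if i = 0 then sl ++ ['B']
        else if i = (n : Int) - 1 then sl ++ ['E']
        else sl ++ ['M']) init
      = init ++ List.replicate (n - 2) 'M' := by
    intro init
    have hstep : (PySem.List.pyRange 1 ((n : Int) - 1) 1).foldl (fun sl i =>
        if i = 0 then sl ++ ['B']
        else if i = (n : Int) - 1 then sl ++ ['E']
        else sl ++ ['M']) init
      = (PySem.List.pyRange 1 ((n : Int) - 1) 1).foldl (fun sl _ => sl ++ ['M']) init := by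
      apply PySem.List.foldl_congr_mem
      intro sl i hi
      rw [PySem.List.mem_pyRange_one] at hi
      rw [if_neg (by omega), if_neg (by omega)]
    rw [hstep, PySem.List.foldl_append_singleton_eq_map]
    congr 1
    rw [List.map_const', PySem.List.length_pyRange_one]
    congr 1
    omega
  rw [hmid]
  simp only [if_neg (by omega : ¬ ((n : Int) - 1 = 0))]
  simp

-- each step of A's outer loop appends exactly B's piece
lemma pvStep (acc : List Char) (wp : String × String) :
    (let word := wp.1.toList
     let word_class := wp.2
     let word_len : Int := word.length
     if word_class ≠ "nr" then
       acc ++ List.replicate word_len.toNat 'O'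
     else if word_len = 1 then
       acc ++ ['S']
     else
       (PySem.List.pyRange 0 word_len 1).foldl (fun sl i =>
         if i = 0 then sl ++ ['B']
         else if i = word_len - 1 then sl ++ ['E']
         else sl ++ ['M']) acc)
    = acc ++ pvPiece wp := by
  simp only [pvPiece]
  by_cases hc : wp.2 ≠ "nr"
  · simp [hc]
  · simp only [if_neg hc]
    set n := wp.1.toList.length with hn
    rcases Nat.lt_or_ge n 2 with h2 | h2
    · interval_cases n
      · simp [PySem.List.pyRange_one_eq_nil]
      · norm_num
    · rw [if_neg (by exact_mod_cast (by omega : ¬ (n : Int) = 1)), if_neg (by omega)]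
      exact pvInner n h2 acc

lemma pvFold (l : List (String × String)) (acc : List Char) :
    l.foldl (fun status_list word_pair =>
      let word := word_pair.1.toList
      let word_class := word_pair.2
      let word_len : Int := word.length
      if word_class ≠ "nr" then
        status_list ++ List.replicate word_len.toNat 'O'
      else if word_len = 1 then
        status_list ++ ['S']
      else
        (PySem.List.pyRange 0 word_len 1).foldl (fun sl i =>
          if i = 0 then sl ++ ['B']
          else if i = word_len - 1 then sl ++ ['E']
          else sl ++ ['M']) status_list) acc
    = acc ++ (l.map pvPiece).flatten := by
  induction l generalizing acc with
  | nil => simp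
  | cons x xs ih =>
    simp only [List.foldl_cons, List.map_cons, List.flatten_cons]
    rw [pvStep acc x, ih, List.append_assoc]

-- ===== VERDICT (by name: the statement is the Claim_ definition above) =====
theorem get_status_list_spec : Claim_equal_get_status_list := by
  intro word_list _
  unfold Spec_get_status_list get_status_list get_status_list_alt
  rw [pvFold word_list []]
  simp only [List.nil_append]
  rfl
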